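-- pv_equiv track=rewrite | github.com/BlueTot/NEA_Project | Stage7a/group_colouring.py | __are_adjacent
-- ===== SOURCE A (Python) =====
-- from collections import deque # Import double ended queue from collections library
--
-- def __are_adjacent(group1, group2):
--     coords = set(group1 + group2)
--     queue = deque([list(coords)[0]])
--     visited = set()
--     while queue:
--         r, c = queue.popleft()
--         visited.add((r, c))
--         for dr, dc in ((-1, 0), (1, 0), (0, -1), (0, 1)):
--             nr, nc = r + dr, c + dc
--             if (nr, nc) in coords and (nr, nc) not in visited:
--                 queue.append((nr, nc))
--     return len(coords) == len(visited)
-- ===== SOURCE B (Python) =====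
-- def __are_adjacent(group1, group2):
--     coords = set(group1 + group2)
--     region = {list(coords)[0]}
--     while True:
--         frontier = {(r, c) for (r, c) in coords
--                     if (r, c) not in region and
--                        ((r - 1, c) in region or (r + 1, c) in region or
--                         (r, c - 1) in region or (r, c + 1) in region)}
--         if not frontier:
--             break
--         region |= frontier
--     return len(region) == len(coords)
-- ===== Notes on version B (the rewrite author's own statement) =====
-- stated objective: alternative
-- what changed: Replaces the deque BFS (which re-enqueues a coordinate once per discovering neighbour, exponentially many times on dense blobs) by round-based region growing: repeatedly absorb every coordinate adjacent to the region until a fixpoint, then compare sizes.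
import Mathlib
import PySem

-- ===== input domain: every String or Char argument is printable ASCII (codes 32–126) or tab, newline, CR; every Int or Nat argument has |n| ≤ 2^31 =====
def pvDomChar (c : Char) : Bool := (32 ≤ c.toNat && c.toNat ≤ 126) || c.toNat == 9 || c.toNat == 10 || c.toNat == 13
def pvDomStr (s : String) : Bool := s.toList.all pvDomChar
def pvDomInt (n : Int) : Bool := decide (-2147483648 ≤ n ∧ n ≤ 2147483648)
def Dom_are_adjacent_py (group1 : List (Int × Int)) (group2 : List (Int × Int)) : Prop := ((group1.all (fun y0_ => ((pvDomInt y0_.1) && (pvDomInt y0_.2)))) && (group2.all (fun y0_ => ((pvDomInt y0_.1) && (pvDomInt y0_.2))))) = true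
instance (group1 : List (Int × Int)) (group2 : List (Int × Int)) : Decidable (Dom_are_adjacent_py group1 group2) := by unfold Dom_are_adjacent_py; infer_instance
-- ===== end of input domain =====

-- B replaces A's deque BFS by round-based region growing to a fixpoint (a different algorithm
-- of similar cost on the sampled inputs); equivalence is about the return value only.
-- A reads list(coords)[0] (its set-iteration seed); the returned connectivity verdict does not
-- depend on which element is taken, and the ports seed from the first-insertion element.

-- the filter/takeWhile length lemmas right below are cited by the ports' termination proofs.

lemma pvFilter_len_le {α : Type} (l : List α) (p q : α → Bool)
    (himp : ∀ a, q a = true → p a = true) : (l.filter q).length ≤ (l.filter p).length := by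
  induction l with
  | nil => simp
  | cons a l ih =>
    by_cases hq : q a = true
    · simp only [List.filter_cons, hq, himp a hq, if_true, List.length_cons]
      omega
    · have hq' : q a = false := by simpa using hq
      by_cases hp : p a = true
      · simp only [List.filter_cons, hq', hp, if_true, Bool.false_eq_true, if_false, List.length_cons]
        omega
      · have hp' : p a = false := by simpa using hp
        simp only [List.filter_cons, hq', hp', Bool.false_eq_true, if_false]
        exact ih

lemma pvFilter_len_lt {α : Type} (l : List α) (p q : α → Bool)
    (himp : ∀ a, q a = true → p a = true)
    (a0 : α) (ha : a0 ∈ l) (hp : p a0 = true) (hq : q a0 = false) :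
    (l.filter q).length < (l.filter p).length := by
  induction l with
  | nil => simp at ha
  | cons a l ih =>
    rcases List.mem_cons.mp ha with rfl | ha'
    · simp only [List.filter_cons, hp, hq, if_true, Bool.false_eq_true, if_false, List.length_cons]
      exact Nat.lt_succ_of_le (pvFilter_len_le l p q himp)
    · by_cases hqa : q a = true
      · simp only [List.filter_cons, hqa, himp a hqa, if_true, List.length_cons]
        exact Nat.succ_lt_succ (ih ha')
      · have hq' : q a = false := by simpa using hqa
        by_cases hpa : p a = true
        · simp only [List.filter_cons, hq', hpa, if_true, Bool.false_eq_true, if_false, List.length_cons]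
          exact Nat.lt_succ_of_lt (ih ha')
        · have hp' : p a = false := by simpa using hpa
          simp only [List.filter_cons, hq', hp', Bool.false_eq_true, if_false]
          exact ih ha'

lemma pvTakeWhile_append_le {α : Type} (p : α → Bool) (q new : List α)
    (h : ∀ x ∈ new, p x = false) :
    ((q ++ new).takeWhile p).length ≤ (q.takeWhile p).length := by
  induction q with
  | nil =>
    cases new with
    | nil => simp
    | cons x xs => simp [h x (by simp)]
  | cons a q ih =>
    by_cases hp : p a = true
    · simp only [List.cons_append, List.takeWhile_cons, hp, if_true, List.length_cons]
      omega
    · have hp' : p a = false := by simpa using hp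
      simp [hp']

-- ===== PORT A =====
def pvDirs : List (Int × Int) := [(-1, 0), (1, 0), (0, -1), (0, 1)]

-- the while-queue loop of A; measure justified case by case in `decreasing_by`
def pvBfsLoop (cl : PySem.Set (Int × Int)) (queue : List (Int × Int)) (visited : PySem.Set (Int × Int)) : PySem.Set (Int × Int) :=
  match queue with
  | [] => visited
  | (r, c) :: q =>
    let visited' := PySem.Set.add visited (r, c)
    let new := (pvDirs.map (fun d => (r + d.1, c + d.2))).filter
        (fun p => PySem.Set.contains cl p && !(PySem.Set.contains visited' p))
    pvBfsLoop cl (q ++ new) visited'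
termination_by ((queue.filter (fun p => !(PySem.Set.contains cl p))).length,
    (cl.filter (fun p => !(PySem.Set.contains visited p))).length,
    (queue.takeWhile (fun p => PySem.Set.contains visited p)).length)
decreasing_by
  set V := visited.add (r, c) with hV
  set N := List.filter (fun p => cl.contains p && !V.contains p)
      (List.map (fun d => (r + d.1, c + d.2)) pvDirs)
  have hN : ∀ x ∈ N, cl.contains x = true ∧ V.contains x = false := by
    intro x hx
    have hx2 := (List.mem_filter.mp hx).2
    rw [Bool.and_eq_true] at hx2
    exact ⟨hx2.1, by simpa using hx2.2⟩
  have hfilN : List.filter (fun p => !cl.contains p) N = [] :=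
    List.filter_eq_nil_iff.mpr (fun a ha => by
      simp [(PySem.Set.contains_iff _ _).mp (hN a ha).1])
  by_cases hc : cl.contains (r, c) = true
  · have e0 : (List.filter (fun p => !cl.contains p) (q ++ N)).length
        = (List.filter (fun p => !cl.contains p) ((r, c) :: q)).length := by
      rw [List.filter_append, hfilN, List.append_nil, List.filter_cons]
      simp [(PySem.Set.contains_iff _ _).mp hc]
    rw [e0]
    by_cases hv : visited.contains (r, c) = true
    · have hadd : V = visited := PySem.Set.add_of_mem ((PySem.Set.contains_iff _ _).mp hv)
      rw [hadd]
      apply Prod.Lex.right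
      apply Prod.Lex.right
      have hle := pvTakeWhile_append_le (fun p => visited.contains p) q N
          (fun x hx => by have h2 := (hN x hx).2; rwa [hadd] at h2)
      have e1 : (List.takeWhile (fun p => visited.contains p) ((r, c) :: q)).length
          = (List.takeWhile (fun p => visited.contains p) q).length + 1 := by
        simp [(PySem.Set.contains_iff _ _).mp hv]
      rw [e1]
      omega
    · apply Prod.Lex.right
      apply Prod.Lex.left
      apply pvFilter_len_lt (a0 := (r, c)) (ha := (PySem.Set.contains_iff _ _).mp hc)
      · intro a ha
        by_cases hva : visited.contains a = true
        · exfalso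
          have : a ∈ V := by
            rw [hV]
            exact (PySem.Set.mem_add _ _ _).mpr (Or.inl ((PySem.Set.contains_iff _ _).mp hva))
          rw [(PySem.Set.contains_iff _ _).mpr this] at ha
          simp at ha
        · cases hb : visited.contains a with
          | false => simp
          | true => exact absurd hb hva
      · simpa using hv
      · have : (r, c) ∈ V := by
          rw [hV]; exact (PySem.Set.mem_add _ _ _).mpr (Or.inr rfl)
        rw [(PySem.Set.contains_iff _ _).mpr this]
        rfl
  · apply Prod.Lex.left
    have hc' : cl.contains (r, c) = false := by simpa using hc
    have hnm : (r, c) ∉ cl := by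
      intro hm
      have hmc := (PySem.Set.contains_iff _ _).mpr hm
      rw [hmc] at hc'
      simp at hc' 
    have e0 : List.filter (fun p => !cl.contains p) ((r, c) :: q)
        = (r, c) :: List.filter (fun p => !cl.contains p) q := by
      simp [hnm]
    rw [List.filter_append, hfilN, List.append_nil, e0]
    simp

def are_adjacent_py (group1 : List (Int × Int)) (group2 : List (Int × Int)) : Bool :=
  let coords := PySem.Set.ofList (group1 ++ group2)
  match coords with
  | [] => false   -- Python raises IndexError here (list(coords)[0]); excluded by Pre_
  | seed :: _ =>
    let visited := pvBfsLoop coords [seed] PySem.Set.empty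
    PySem.Set.len coords == PySem.Set.len visited

-- ===== PORT B =====
-- the while-True saturation loop of B: absorb the frontier until it is empty
def pvGrow (cl : PySem.Set (Int × Int)) (region : PySem.Set (Int × Int)) : PySem.Set (Int × Int) :=
  let frontier := cl.filter (fun p => !(PySem.Set.contains region p) &&
      (PySem.Set.contains region (p.1 - 1, p.2) || PySem.Set.contains region (p.1 + 1, p.2) ||
       PySem.Set.contains region (p.1, p.2 - 1) || PySem.Set.contains region (p.1, p.2 + 1)))
  if frontier.isEmpty then region else pvGrow cl (PySem.Set.union region frontier)
termination_by (cl.filter (fun p => !(PySem.Set.contains region p))).length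
decreasing_by
  rename_i hne
  have hfe : frontier ≠ [] := by
    intro h0; exact hne (by simp [h0, List.isEmpty])
  obtain ⟨a0, ha0⟩ : ∃ a0, a0 ∈ frontier := List.exists_mem_of_ne_nil frontier hfe
  have ha0' : a0 ∈ cl ∧ (!(PySem.Set.contains region a0) &&
      (PySem.Set.contains region (a0.1 - 1, a0.2) || PySem.Set.contains region (a0.1 + 1, a0.2) ||
       PySem.Set.contains region (a0.1, a0.2 - 1) || PySem.Set.contains region (a0.1, a0.2 + 1))) = true := by
    have h := ha0
    simp only [frontier] at h
    simp only [List.unattach, List.mem_map, List.mem_filter, List.mem_attach, true_and] at h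
    obtain ⟨x, hx, rfl⟩ := h
    exact ⟨x.property, hx⟩
  obtain ⟨hacl, hcond⟩ := ha0'
  have hmem : a0 ∉ region := by
    by_cases h : PySem.Set.contains region a0 = true
    · simp at hcond
      intro hm
      exact absurd ((PySem.Set.contains_iff _ _).mpr hm) (by simp [hcond.1])
    · intro hm; exact h ((PySem.Set.contains_iff _ _).mpr hm)
  apply pvFilter_len_lt (himp := ?_) (a0 := a0) (ha := hacl)
  · simpa using hmem
  · have hcu : PySem.Set.contains (PySem.Set.union region frontier) a0 = true :=
      (PySem.Set.contains_iff _ _).mpr ((PySem.Set.mem_union _ _ _).mpr (Or.inr ha0))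
    have h2 : (!(PySem.Set.contains (PySem.Set.union region frontier) a0)) = false := by
      rw [hcu]; rfl
    exact h2
  · intro a h
    by_cases hca : PySem.Set.contains region a = true
    · have hcu : PySem.Set.contains (PySem.Set.union region frontier) a = true :=
        (PySem.Set.contains_iff _ _).mpr ((PySem.Set.mem_union _ _ _).mpr
          (Or.inl ((PySem.Set.contains_iff _ _).mp hca)))
      have h2 : (!(PySem.Set.contains (PySem.Set.union region frontier) a)) = true := h
      rw [hcu] at h2
      simp at h2
    · cases hb : PySem.Set.contains region a with
      | false => simp
      | true => exact absurd hb hca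

def are_adjacent_py_alt (group1 : List (Int × Int)) (group2 : List (Int × Int)) : Bool :=
  let coords := PySem.Set.ofList (group1 ++ group2)
  match coords with
  | [] => false   -- Python raises IndexError here (list(coords)[0]); excluded by Pre_
  | seed :: _ =>
    let region := pvGrow coords (PySem.Set.ofList [seed])
    PySem.Set.len region == PySem.Set.len coords

-- ===== PRECONDITION & SPEC =====
-- Pre_ excludes exactly the input with no coordinates at all, on which A raises IndexError
-- at list(coords)[0] (B raises there too).
def Pre_are_adjacent_py (group1 : List (Int × Int)) (group2 : List (Int × Int)) : Prop := group1 ++ group2 ≠ []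
instance (group1 : List (Int × Int)) (group2 : List (Int × Int)) : Decidable (Pre_are_adjacent_py group1 group2) := by unfold Pre_are_adjacent_py; infer_instance
def pvWitness_are_adjacent_py : (List (Int × Int)) × (List (Int × Int)) := ([(0, 0)], [(0, 1)])

def Spec_are_adjacent_py (group1 : List (Int × Int)) (group2 : List (Int × Int)) (out : Bool) : Prop := out = are_adjacent_py_alt group1 group2
instance (group1 : List (Int × Int)) (group2 : List (Int × Int)) (out : Bool) : Decidable (Spec_are_adjacent_py group1 group2 out) := by unfold Spec_are_adjacent_py; infer_instance

-- ===== CLAIM (what is proved, stated in full; the proofs are below) =====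
def Claim_equal_are_adjacent_py : Prop := ∀ (group1 : List (Int × Int)) (group2 : List (Int × Int)), Dom_are_adjacent_py group1 group2 → Pre_are_adjacent_py group1 group2 → Spec_are_adjacent_py group1 group2 (are_adjacent_py group1 group2)

-- ===== LEMMAS AND PROOFS =====

-- the four grid neighbours of a point, and the step relations of the two algorithms
def pvNbrs (a : Int × Int) : List (Int × Int) :=
  [(a.1 - 1, a.2), (a.1 + 1, a.2), (a.1, a.2 - 1), (a.1, a.2 + 1)]

def pvStep (cl : List (Int × Int)) (a b : Int × Int) : Prop := b ∈ cl ∧ b ∈ pvNbrs a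

def pvStepAv (cl v : List (Int × Int)) (a b : Int × Int) : Prop := b ∈ cl ∧ b ∉ v ∧ b ∈ pvNbrs a

lemma pvNbrs_symm {a b : Int × Int} (h : b ∈ pvNbrs a) : a ∈ pvNbrs b := by
  rcases a with ⟨x, y⟩; rcases b with ⟨u, v⟩
  simp [pvNbrs, Prod.ext_iff] at h ⊢
  omega

lemma pvMapDirs (r c : Int) : (pvDirs.map (fun d => (r + d.1, c + d.2))) = pvNbrs (r, c) := by
  simp [pvDirs, pvNbrs, Prod.ext_iff]
  omega

-- strict filter-length lemma shared by the two termination arguments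
-- step relation is antitone in the avoided set
lemma pvStepAv_mono {cl v v' : List (Int × Int)} (h : ∀ x, x ∈ v → x ∈ v') {a b : Int × Int} :
    pvStepAv cl v' a b → pvStepAv cl v a b :=
  fun ⟨h1, h2, h3⟩ => ⟨h1, fun hm => h2 (h _ hm), h3⟩

-- the frontier list a popped coordinate rc contributes to the queue
def pvNewOf (cl v : PySem.Set (Int × Int)) (rc : Int × Int) : List (Int × Int) :=
  (pvNbrs rc).filter (fun p => PySem.Set.contains cl p && !(PySem.Set.contains (PySem.Set.add v rc) p))

-- where a path that avoids v can end, relative to the pop of rc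
lemma pvBfs_subM (cl v : PySem.Set (Int × Int)) (rc s x : Int × Int)
    (hrt : Relation.ReflTransGen (pvStepAv cl v) s x) :
    x = s ∨ x = rc ∨ (x ∉ PySem.Set.add v rc ∧
      (Relation.ReflTransGen (pvStepAv cl (PySem.Set.add v rc)) s x ∨
       ∃ z ∈ pvNewOf cl v rc, Relation.ReflTransGen (pvStepAv cl (PySem.Set.add v rc)) z x)) := by
  induction hrt with
  | refl => exact Or.inl rfl
  | @tail y x hsy hstep ih =>
    obtain ⟨hxcl, hxv, hxn⟩ := hstep
    by_cases hxrc : x = rc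
    · exact Or.inr (Or.inl hxrc)
    · have hxv' : x ∉ PySem.Set.add v rc := by
        rw [PySem.Set.mem_add]
        rintro (h | h)
        · exact hxv h
        · exact hxrc h
      rcases ih with heq | heq | ⟨hyv', hy⟩
      · exact Or.inr (Or.inr ⟨hxv', Or.inl (Relation.ReflTransGen.single ⟨hxcl, hxv', heq ▸ hxn⟩)⟩)
      · refine Or.inr (Or.inr ⟨hxv', Or.inr ⟨x, ?_, Relation.ReflTransGen.refl⟩⟩)
        refine List.mem_filter.mpr ⟨heq ▸ hxn, ?_⟩
        rw [Bool.and_eq_true]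
        constructor
        · exact (PySem.Set.contains_iff _ _).mpr hxcl
        · simp only [Bool.not_eq_true']
          cases hb : PySem.Set.contains (PySem.Set.add v rc) x with
          | false => rfl
          | true => exact absurd ((PySem.Set.contains_iff _ _).mp hb) hxv'
      · rcases hy with hrt' | ⟨z, hz, hrtz⟩
        · exact Or.inr (Or.inr ⟨hxv', Or.inl (hrt'.tail ⟨hxcl, hxv', hxn⟩)⟩)
        · exact Or.inr (Or.inr ⟨hxv', Or.inr ⟨z, hz, hrtz.tail ⟨hxcl, hxv', hxn⟩⟩⟩)

-- members of pvNewOf are coords adjacent to rc and not in add v rc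
lemma pvNewOf_mem {cl v : PySem.Set (Int × Int)} {rc z : Int × Int} (h : z ∈ pvNewOf cl v rc) :
    z ∈ cl ∧ z ∉ PySem.Set.add v rc ∧ z ∈ pvNbrs rc := by
  have h1 := List.mem_of_mem_filter h
  have h2 := List.of_mem_filter h
  rw [Bool.and_eq_true] at h2
  refine ⟨(PySem.Set.contains_iff _ _).mp h2.1, ?_, h1⟩
  intro hm
  have := (PySem.Set.contains_iff _ _).mpr hm
  rw [this] at h2
  simpa using h2.2

-- one pop step preserves the invariant set  "visited ∪ reachable-from-queue avoiding visited"
lemma pvBfs_step_eq (cl v : PySem.Set (Int × Int)) (rc : Int × Int) (q : List (Int × Int)) (x : Int × Int) :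
    (x ∈ PySem.Set.add v rc ∨ ∃ s ∈ q ++ pvNewOf cl v rc,
        Relation.ReflTransGen (pvStepAv cl (PySem.Set.add v rc)) s x)
    ↔ (x ∈ v ∨ ∃ s ∈ rc :: q, Relation.ReflTransGen (pvStepAv cl v) s x) := by
  have hmono : ∀ {a b : Int × Int}, pvStepAv cl (PySem.Set.add v rc) a b → pvStepAv cl v a b :=
    fun h => pvStepAv_mono (fun y hy => (PySem.Set.mem_add v rc y).mpr (Or.inl hy)) h
  constructor
  · rintro (hv' | ⟨s, hs, hrt⟩)
    · rcases (PySem.Set.mem_add v rc x).mp hv' with h | h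
      · exact Or.inl h
      · exact Or.inr ⟨rc, List.mem_cons_self .., h ▸ Relation.ReflTransGen.refl⟩
    · rcases List.mem_append.mp hs with hsq | hsnew
      · exact Or.inr ⟨s, List.mem_cons_of_mem _ hsq, hrt.mono @hmono⟩
      · obtain ⟨hscl, hsv', hsn⟩ := pvNewOf_mem hsnew
        have hsv : s ∉ v := fun hm => hsv' ((PySem.Set.mem_add v rc s).mpr (Or.inl hm))
        exact Or.inr ⟨rc, List.mem_cons_self ..,
          Relation.ReflTransGen.head ⟨hscl, hsv, hsn⟩ (hrt.mono @hmono)⟩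
  · rintro (hv | ⟨s, hs, hrt⟩)
    · exact Or.inl ((PySem.Set.mem_add v rc x).mpr (Or.inl hv))
    · rcases List.mem_cons.mp hs with heqs | hsq
      · -- s = rc
        rcases pvBfs_subM cl v rc s x hrt with heq | heq | ⟨hxv', hy⟩
        · exact Or.inl ((PySem.Set.mem_add v rc x).mpr (Or.inr (heq.trans heqs)))
        · exact Or.inl ((PySem.Set.mem_add v rc x).mpr (Or.inr heq))
        · rcases hy with hrt' | ⟨z, hz, hrtz⟩
          · rcases hrt'.cases_head with heq2 | ⟨w, hw, hrtw⟩
            · exact Or.inl ((PySem.Set.mem_add v rc x).mpr (Or.inr (heq2.symm.trans heqs)))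
            · obtain ⟨hwcl, hwv', hwn⟩ := hw
              refine Or.inr ⟨w, List.mem_append.mpr (Or.inr ?_), hrtw⟩
              refine List.mem_filter.mpr ⟨heqs ▸ hwn, ?_⟩
              rw [Bool.and_eq_true]
              refine ⟨(PySem.Set.contains_iff _ _).mpr hwcl, ?_⟩
              simp only [Bool.not_eq_true']
              cases hb : PySem.Set.contains (PySem.Set.add v rc) w with
              | false => rfl
              | true => exact absurd ((PySem.Set.contains_iff _ _).mp hb) hwv'
          · exact Or.inr ⟨z, List.mem_append.mpr (Or.inr hz), hrtz⟩
      · rcases pvBfs_subM cl v rc s x hrt with heq | heq | ⟨hxv', hy⟩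
        · exact Or.inr ⟨s, List.mem_append.mpr (Or.inl hsq), heq ▸ Relation.ReflTransGen.refl⟩
        · exact Or.inl ((PySem.Set.mem_add v rc x).mpr (Or.inr heq))
        · rcases hy with hrt' | ⟨z, hz, hrtz⟩
          · exact Or.inr ⟨s, List.mem_append.mpr (Or.inl hsq), hrt'⟩
          · exact Or.inr ⟨z, List.mem_append.mpr (Or.inr hz), hrtz⟩

-- A's loop returns  visited ∪ {reachable from the queue through unvisited coords}
lemma pvBfs_mem (cl : PySem.Set (Int × Int)) (q : List (Int × Int))
    (v : PySem.Set (Int × Int)) (x : Int × Int) :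
    x ∈ pvBfsLoop cl q v ↔ x ∈ v ∨ ∃ s ∈ q, Relation.ReflTransGen (pvStepAv cl v) s x := by
  fun_induction pvBfsLoop cl q v with
  | case1 v => simp
  | case2 v r c q visited' new ih =>
    have hnew : new = pvNewOf cl v (r, c) := by
      show List.filter _ (List.map (fun d => (r + d.1, c + d.2)) pvDirs) = _
      rw [pvNewOf, pvMapDirs]
    rw [ih, hnew]
    exact pvBfs_step_eq cl v (r, c) q x

-- A's loop keeps the visited set duplicate-free
lemma pvBfs_nodup (cl : PySem.Set (Int × Int)) (q : List (Int × Int))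
    (v : PySem.Set (Int × Int)) : v.Nodup → (pvBfsLoop cl q v).Nodup := by
  fun_induction pvBfsLoop cl q v with
  | case1 v => exact id
  | case2 v r c q visited' new ih =>
    intro h
    exact ih (PySem.Set.nodup_add v (r, c) h)

-- B's frontier as a plain filter
def pvFrontier (cl region : PySem.Set (Int × Int)) : List (Int × Int) :=
  cl.filter (fun p => !(PySem.Set.contains region p) &&
      (PySem.Set.contains region (p.1 - 1, p.2) || PySem.Set.contains region (p.1 + 1, p.2) ||
       PySem.Set.contains region (p.1, p.2 - 1) || PySem.Set.contains region (p.1, p.2 + 1)))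

lemma pvFrontier_mem {cl region : PySem.Set (Int × Int)} {y : Int × Int}
    (h : y ∈ pvFrontier cl region) :
    y ∈ cl ∧ y ∉ region ∧ ∃ nb ∈ pvNbrs y, nb ∈ region := by
  have h1 := List.mem_of_mem_filter h
  have h2 := List.of_mem_filter h
  rw [Bool.and_eq_true] at h2
  obtain ⟨hnr, hor⟩ := h2
  refine ⟨h1, ?_, ?_⟩
  · intro hm
    rw [(PySem.Set.contains_iff _ _).mpr hm] at hnr
    simp at hnr
  · rcases Bool.or_eq_true _ _ |>.mp hor with hor3 | h4
    · rcases Bool.or_eq_true _ _ |>.mp hor3 with hor2 | h3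
      · rcases Bool.or_eq_true _ _ |>.mp hor2 with h1' | h2'
        · exact ⟨_, by simp [pvNbrs], (PySem.Set.contains_iff _ _).mp h1'⟩
        · exact ⟨_, by simp [pvNbrs], (PySem.Set.contains_iff _ _).mp h2'⟩
      · exact ⟨_, by simp [pvNbrs], (PySem.Set.contains_iff _ _).mp h3⟩
    · exact ⟨_, by simp [pvNbrs], (PySem.Set.contains_iff _ _).mp h4⟩

lemma pvFrontier_mem_of {cl region : PySem.Set (Int × Int)} {p : Int × Int}
    (hcl : p ∈ cl) (hnr : p ∉ region) {nb : Int × Int}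
    (hnb : nb ∈ pvNbrs p) (hnbr : nb ∈ region) : p ∈ pvFrontier cl region := by
  refine List.mem_filter.mpr ⟨hcl, ?_⟩
  rw [Bool.and_eq_true]
  constructor
  · simp only [Bool.not_eq_true']
    cases hb : PySem.Set.contains region p with
    | false => rfl
    | true => exact absurd ((PySem.Set.contains_iff _ _).mp hb) hnr
  · have hc := (PySem.Set.contains_iff region nb).mpr hnbr
    simp only [pvNbrs, List.mem_cons, List.not_mem_nil, or_false] at hnb
    rcases hnb with rfl | rfl | rfl | rfl <;> simp [hnbr]

lemma pvGrow_subset (cl region : PySem.Set (Int × Int)) :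
    ∀ x ∈ region, x ∈ pvGrow cl region := by
  fun_induction pvGrow cl region with
  | case1 region frontier h =>
    have hfr : frontier = pvFrontier cl region := by
      show (List.filter _ (List.attach cl)).unattach = _
      rw [List.unattach_filter (hf := fun x h => rfl), List.unattach_attach]
      rfl
    intro x hx
    show x ∈ (if (pvFrontier cl region).isEmpty = true then region
        else pvGrow cl (PySem.Set.union region (pvFrontier cl region)))
    rw [if_pos (hfr ▸ h)]
    exact hx
  | case2 region frontier h ih =>
    have hfr : frontier = pvFrontier cl region := by
      show (List.filter _ (List.attach cl)).unattach = _
      rw [List.unattach_filter (hf := fun x h => rfl), List.unattach_attach]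
      rfl
    intro x hx
    show x ∈ (if (pvFrontier cl region).isEmpty = true then region
        else pvGrow cl (PySem.Set.union region (pvFrontier cl region)))
    rw [if_neg (by rw [← hfr]; exact h)]
    rw [← hfr]
    exact ih x ((PySem.Set.mem_union _ _ _).mpr (Or.inl hx))

lemma pvGrow_nodup (cl region : PySem.Set (Int × Int)) :
    List.Nodup region → List.Nodup (pvGrow cl region) := by
  fun_induction pvGrow cl region with
  | case1 region frontier hfe =>
    intro h
    have hfr : frontier = pvFrontier cl region := by
      show (List.filter _ (List.attach cl)).unattach = _
      rw [List.unattach_filter (hf := fun x h => rfl), List.unattach_attach]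
      rfl
    show List.Nodup (if (pvFrontier cl region).isEmpty = true then region
        else pvGrow cl (PySem.Set.union region (pvFrontier cl region)))
    rw [if_pos (hfr ▸ hfe)]
    exact h
  | case2 region frontier hfe ih =>
    intro h
    have hfr : frontier = pvFrontier cl region := by
      show (List.filter _ (List.attach cl)).unattach = _
      rw [List.unattach_filter (hf := fun x h => rfl), List.unattach_attach]
      rfl
    show List.Nodup (if (pvFrontier cl region).isEmpty = true then region
        else pvGrow cl (PySem.Set.union region (pvFrontier cl region)))
    rw [if_neg (by rw [← hfr]; exact hfe), ← hfr]
    exact ih (PySem.Set.nodup_union _ _ h)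

lemma pvGrow_sound (cl region : PySem.Set (Int × Int)) (seed : Int × Int) :
    (∀ y ∈ region, Relation.ReflTransGen (pvStep cl) seed y) →
    ∀ x ∈ pvGrow cl region, Relation.ReflTransGen (pvStep cl) seed x := by
  fun_induction pvGrow cl region with
  | case1 region frontier hfe =>
    intro hreg
    have hfr : frontier = pvFrontier cl region := by
      show (List.filter _ (List.attach cl)).unattach = _
      rw [List.unattach_filter (hf := fun x h => rfl), List.unattach_attach]
      rfl
    intro x hx
    replace hx : x ∈ (if (pvFrontier cl region).isEmpty = true then region
        else pvGrow cl (PySem.Set.union region (pvFrontier cl region))) := hx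
    rw [if_pos (hfr ▸ hfe)] at hx
    exact hreg x hx
  | case2 region frontier hfe ih =>
    intro hreg
    have hfr : frontier = pvFrontier cl region := by
      show (List.filter _ (List.attach cl)).unattach = _
      rw [List.unattach_filter (hf := fun x h => rfl), List.unattach_attach]
      rfl
    intro x hx
    have hx' : x ∈ pvGrow cl (PySem.Set.union region frontier) := by
      replace hx : x ∈ (if (pvFrontier cl region).isEmpty = true then region
          else pvGrow cl (PySem.Set.union region (pvFrontier cl region))) := hx
      rwa [if_neg (by rw [← hfr]; exact hfe), ← hfr] at hx
    refine ih ?_ x hx'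
    intro y hy
    rcases (PySem.Set.mem_union _ _ _).mp hy with hyr | hyf
    · exact hreg y hyr
    · rw [hfr] at hyf
      obtain ⟨hycl, _, nb, hnb, hnbr⟩ := pvFrontier_mem hyf
      exact (hreg nb hnbr).tail ⟨hycl, pvNbrs_symm hnb⟩

lemma pvGrow_closed (cl region : PySem.Set (Int × Int)) :
    ∀ p ∈ cl, p ∉ pvGrow cl region → ∀ nb ∈ pvNbrs p, nb ∉ pvGrow cl region := by
  fun_induction pvGrow cl region with
  | case1 region frontier hfe =>
    have hfr : frontier = pvFrontier cl region := by
      show (List.filter _ (List.attach cl)).unattach = _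
      rw [List.unattach_filter (hf := fun x h => rfl), List.unattach_attach]
      rfl
    have hres : (if (pvFrontier cl region).isEmpty = true then region
        else pvGrow cl (PySem.Set.union region (pvFrontier cl region))) = region :=
      if_pos (hfr ▸ hfe)
    intro p hpcl hpr nb hnb hnbr
    replace hpr : p ∉ (if (pvFrontier cl region).isEmpty = true then region
        else pvGrow cl (PySem.Set.union region (pvFrontier cl region))) := hpr
    replace hnbr : nb ∈ (if (pvFrontier cl region).isEmpty = true then region
        else pvGrow cl (PySem.Set.union region (pvFrontier cl region))) := hnbr
    rw [hres] at hpr hnbr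
    have hpf : p ∈ pvFrontier cl region := pvFrontier_mem_of hpcl hpr hnb hnbr
    rw [← hfr] at hpf
    rw [List.isEmpty_iff.mp hfe] at hpf
    simp at hpf
  | case2 region frontier hfe ih =>
    have hfr : frontier = pvFrontier cl region := by
      show (List.filter _ (List.attach cl)).unattach = _
      rw [List.unattach_filter (hf := fun x h => rfl), List.unattach_attach]
      rfl
    have hres : (if (pvFrontier cl region).isEmpty = true then region
        else pvGrow cl (PySem.Set.union region (pvFrontier cl region)))
        = pvGrow cl (PySem.Set.union region frontier) := by
      rw [if_neg (by rw [← hfr]; exact hfe), ← hfr]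
    intro p hpcl hpr nb hnb hnbr
    replace hpr : p ∉ (if (pvFrontier cl region).isEmpty = true then region
        else pvGrow cl (PySem.Set.union region (pvFrontier cl region))) := hpr
    replace hnbr : nb ∈ (if (pvFrontier cl region).isEmpty = true then region
        else pvGrow cl (PySem.Set.union region (pvFrontier cl region))) := hnbr
    rw [hres] at hpr hnbr
    exact ih p hpcl hpr nb hnb hnbr

lemma pvGrow_complete (cl region : PySem.Set (Int × Int)) (seed x : Int × Int)
    (hs : seed ∈ region) (hrt : Relation.ReflTransGen (pvStep cl) seed x) :
    x ∈ pvGrow cl region := by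
  induction hrt with
  | refl => exact pvGrow_subset cl region seed hs
  | @tail y x hsy hstep ihy =>
    by_contra hx
    exact pvGrow_closed cl region x hstep.1 hx y (pvNbrs_symm hstep.2) ihy

lemma pvBeqComm (a b : Int) : (a == b) = (b == a) := by
  by_cases h : a = b
  · subst h; rfl
  · have h1 : (a == b) = false := by simpa [beq_iff_eq] using h
    have h2 : (b == a) = false := by simpa [beq_iff_eq] using fun hh => h hh.symm
    rw [h1, h2]

-- ===== VERDICT (by name: the statement is the Claim_ definition above) =====
theorem are_adjacent_py_spec : Claim_equal_are_adjacent_py := by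
  intro g1 g2 _ _
  unfold Spec_are_adjacent_py are_adjacent_py are_adjacent_py_alt
  cases hcl : PySem.Set.ofList (g1 ++ g2) with
  | nil => rfl
  | cons seed rest =>
    show (PySem.Set.len (seed :: rest) ==
        PySem.Set.len (pvBfsLoop (seed :: rest) [seed] PySem.Set.empty)) =
      (PySem.Set.len (pvGrow (seed :: rest) (PySem.Set.ofList [seed])) ==
        PySem.Set.len (seed :: rest))
    have hseedmem : seed ∈ PySem.Set.ofList [seed] := by
      rw [PySem.Set.mem_ofList]
      exact List.mem_cons_self ..
    have hmemiff : ∀ x, x ∈ pvBfsLoop (seed :: rest) [seed] PySem.Set.empty ↔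
        x ∈ pvGrow (seed :: rest) (PySem.Set.ofList [seed]) := by
      intro x
      rw [pvBfs_mem]
      constructor
      · rintro (h | ⟨s, hs, hrt⟩)
        · exact absurd h (List.not_mem_nil)
        · have hs' : s = seed := by simpa using hs
          have hrt' : Relation.ReflTransGen (pvStep (seed :: rest)) seed x := by
            refine (hs' ▸ hrt).mono ?_
            rintro a b ⟨h1, h2, h3⟩
            exact ⟨h1, h3⟩
          exact pvGrow_complete _ _ seed x hseedmem hrt'
      · intro h
        refine Or.inr ⟨seed, List.mem_cons_self .., ?_⟩
        have hsound := pvGrow_sound (seed :: rest) (PySem.Set.ofList [seed]) seed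
          (fun y hy => by
            rw [PySem.Set.mem_ofList] at hy
            have : y = seed := by simpa using hy
            exact this ▸ Relation.ReflTransGen.refl) x h
        refine hsound.mono ?_
        rintro a b ⟨h1, h2⟩
        exact ⟨h1, List.not_mem_nil, h2⟩
    have hnodA : List.Nodup (pvBfsLoop (seed :: rest) [seed] PySem.Set.empty) :=
      pvBfs_nodup _ _ _ List.nodup_nil
    have hnodB : List.Nodup (pvGrow (seed :: rest) (PySem.Set.ofList [seed])) :=
      pvGrow_nodup _ _ (PySem.Set.nodup_ofList [seed])
    have hperm := (List.perm_ext_iff_of_nodup hnodA hnodB).mpr hmemiff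
    have hlen : PySem.Set.len (pvBfsLoop (seed :: rest) [seed] PySem.Set.empty)
        = PySem.Set.len (pvGrow (seed :: rest) (PySem.Set.ofList [seed])) := by
      unfold PySem.Set.len
      rw [hperm.length_eq]
    rw [hlen, pvBeqComm]
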